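-- pv_equiv track=rewrite | github.com/Graciele-NL/Fundamentos-do-Python | Exercícios/Exercício10.py | espelho
-- ===== SOURCE A (Python) =====
-- def espelho(palavra):
--     invertidas_espelho = {'d':'b','b':'d','o':'o','q':'p','p':'q','v':'v','w':'w','x':'x'}
--     espelho = True
--     nova_palavra = palavra
--
--     for i in palavra:
--         if i not in invertidas_espelho.keys():
--             espelho = False
--
--     if espelho:
--         for i in palavra:
--             nova_palavra = nova_palavra.replace(i,invertidas_espelho[i])
--
--         return nova_palavra[::-1]
--
--     else:
--         return 'INVALID'
-- ===== SOURCE B (Python) =====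
-- def espelho(palavra):
--     m = {'d': 'b', 'b': 'd', 'o': 'o', 'q': 'p', 'p': 'q', 'v': 'v', 'w': 'w', 'x': 'x'}
--     if any(c not in m for c in palavra):
--         return 'INVALID'
--     return ''.join(m[c] for c in reversed(palavra))
-- ===== Notes on version B (the rewrite author's own statement) =====
-- stated objective: simpler
-- what changed: B replaces A's quadratic loop of sequential global str.replace calls (whose replacements cascade) by a single per-character mapping over the reversed word, after one validity scan.
-- intended difference: On valid words containing both letters of a mirror pair (both 'd' and 'b', or both 'p' and 'q') A's cascading global replaces collapse the whole pair to one letter (e.g. 'db' -> 'dd'), while B returns the true mirror image ('db' -> 'db'), which is the intended behaviour of a mirror function. — e.g. on espelho("db"): A returns "dd", B returns "db"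
import Mathlib
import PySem

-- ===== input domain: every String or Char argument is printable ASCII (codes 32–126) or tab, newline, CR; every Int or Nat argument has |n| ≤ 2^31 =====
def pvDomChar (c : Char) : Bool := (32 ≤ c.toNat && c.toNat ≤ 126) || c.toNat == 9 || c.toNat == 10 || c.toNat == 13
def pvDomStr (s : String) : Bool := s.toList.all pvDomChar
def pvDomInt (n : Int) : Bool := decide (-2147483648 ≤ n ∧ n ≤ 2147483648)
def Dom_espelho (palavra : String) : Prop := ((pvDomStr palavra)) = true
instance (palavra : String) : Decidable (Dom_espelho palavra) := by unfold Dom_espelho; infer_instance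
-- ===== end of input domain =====

-- B computes the mirror image directly (one pass mapping each char over the reversed word) instead of
-- A's loop of global str.replace calls whose replacements cascade; on valid words containing both
-- letters of a mirror pair A collapses the pair to one letter, B returns the intended mirror (D_espelho).


-- ===== PORT A =====
-- the literal dict of A's invertidas_espelho (B's m is the same literal)
def pvMirror : PySem.Dict Char Char :=
  PySem.Dict.ofList [('d','b'),('b','d'),('o','o'),('q','p'),('p','q'),('v','v'),('w','w'),('x','x')]

def espelho (palavra : String) : String :=
  -- espelho = True; for i in palavra: if i not in invertidas_espelho.keys(): espelho = False
  let esp : Bool := palavra.toList.foldl (fun e i => if pvMirror.contains i then e else false) true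
  if esp then
    -- for i in palavra: nova_palavra = nova_palavra.replace(i, invertidas_espelho[i])
    -- invertidas_espelho[i] cannot KeyError here (esp guarantees every i is a key), so getD's default is never used
    let nova : String := palavra.toList.foldl
      (fun s i => PySem.Str.replace s (String.ofList [i]) (String.ofList [pvMirror.getD i i])) palavra
    (PySem.Str.slice? nova none none (-1)).getD ""   -- nova_palavra[::-1]; step -1 ≠ 0, never none
  else "INVALID"

-- ===== PORT B =====
def espelho_alt (palavra : String) : String :=
  if palavra.toList.any (fun c => !(pvMirror.contains c)) then "INVALID"
  else String.ofList (palavra.toList.reverse.map (fun c => pvMirror.getD c c))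
  -- ''.join(m[c] for c in reversed(palavra)); m[c] cannot KeyError (the any-guard returned already)

-- ===== PRECONDITION & SPEC =====
-- On valid words containing both letters of a mirror pair (both 'd' and 'b', or both 'p' and 'q'),
-- A's cascading global replaces collapse the whole pair to a single letter (espelho "db" = "dd"),
-- while B returns the true mirror image (espelho_alt "db" = "db"), the intended behaviour.
def D_espelho (palavra : String) : Prop :=
  (∀ c ∈ palavra.toList, c ∈ "dboqpvwx".toList) ∧
  (∃ s ∈ ["db", "pq"], ∀ c ∈ s.toList, c ∈ palavra.toList)
instance (palavra : String) : Decidable (D_espelho palavra) := by unfold D_espelho; infer_instance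

def Spec_espelho (palavra : String) (out : String) : Prop := ¬ D_espelho palavra → out = espelho_alt palavra
instance (palavra : String) (out : String) : Decidable (Spec_espelho palavra out) := by unfold Spec_espelho; infer_instance

def pvDiffWitness_espelho : String := "db"
def pvDiffWitnessOut_espelho : String × String := ("dd", "db")

-- ===== CLAIM (what is proved, stated in full; the proofs are below) =====
def Claim_unchanged_espelho : Prop := ∀ (palavra : String), Dom_espelho palavra → Spec_espelho palavra (espelho palavra)
def Claim_changed_espelho : Prop := Dom_espelho (pvDiffWitness_espelho) ∧ D_espelho (pvDiffWitness_espelho) ∧ espelho (pvDiffWitness_espelho) = pvDiffWitnessOut_espelho.1 ∧ espelho_alt (pvDiffWitness_espelho) = pvDiffWitnessOut_espelho.2 ∧ pvDiffWitnessOut_espelho.1 ≠ pvDiffWitnessOut_espelho.2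
def Claim_exact_espelho : Prop := ∀ (palavra : String), Dom_espelho palavra → D_espelho palavra → espelho palavra ≠ espelho_alt palavra

-- ===== LEMMAS AND PROOFS =====

def pvKeys : List Char := ['d','b','o','q','p','v','w','x']

-- the mirror dict as a plain function
def pvFS (c : Char) : Char :=
  if c = 'd' then 'b' else if c = 'b' then 'd' else if c = 'q' then 'p' else if c = 'p' then 'q' else c

theorem pvMirror_mk : pvMirror = PySem.Dict.mk [('d','b'),('b','d'),('o','o'),('q','p'),('p','q'),('v','v'),('w','w'),('x','x')] := by decide

theorem pvContains_eq (c : Char) : pvMirror.contains c = decide (c ∈ pvKeys) := by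
  simp only [pvMirror_mk, PySem.Dict.contains_mk, pvKeys, List.mem_cons, List.not_mem_nil, or_false]
  cases hc : c == 'd' <;> cases hb : c == 'b' <;> cases ho : c == 'o' <;> cases hq : c == 'q' <;>
    cases hp : c == 'p' <;> cases hv : c == 'v' <;> cases hw : c == 'w' <;> cases hx : c == 'x' <;>
    simp_all [BEq.comm]

theorem pvGetD_eq (c : Char) : pvMirror.getD c c = pvFS c := by
  by_cases hd : c = 'd'; · subst hd; rfl
  by_cases hb : c = 'b'; · subst hb; rfl
  by_cases ho : c = 'o'; · subst ho; rfl
  by_cases hq : c = 'q'; · subst hq; rfl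
  by_cases hp : c = 'p'; · subst hp; rfl
  by_cases hv : c = 'v'; · subst hv; rfl
  by_cases hw : c = 'w'; · subst hw; rfl
  by_cases hx : c = 'x'; · subst hx; rfl
  simp [pvMirror_mk, PySem.Dict.getD, pvFS,
    Ne.symm hd, Ne.symm hb, Ne.symm ho, Ne.symm hq, Ne.symm hp, Ne.symm hv, Ne.symm hw, Ne.symm hx,
    hd, hb, hq, hp, PySem.Dict.get?]

theorem pvFS_cases (x : Char) (h : pvFS x ≠ x) :
    (x = 'd' ∧ pvFS x = 'b') ∨ (x = 'b' ∧ pvFS x = 'd') ∨ (x = 'p' ∧ pvFS x = 'q') ∨ (x = 'q' ∧ pvFS x = 'p') := by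
  by_cases h1 : x = 'd'; · exact Or.inl ⟨h1, by subst h1; rfl⟩
  by_cases h2 : x = 'b'; · exact Or.inr (Or.inl ⟨h2, by subst h2; rfl⟩)
  by_cases h3 : x = 'p'; · exact Or.inr (Or.inr (Or.inl ⟨h3, by subst h3; rfl⟩))
  by_cases h4 : x = 'q'; · exact Or.inr (Or.inr (Or.inr ⟨h4, by subst h4; rfl⟩))
  exact absurd (by simp [pvFS, h1, h2, h3, h4]) h

-- substitution of one char (what s.replace(i, j) does for single chars)
def pvSub (a b x : Char) : Char := if x = a then b else x

theorem pv_go_single (a b : Char) : ∀ (l acc : List Char) (fuel : Nat), l.length ≤ fuel →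
    PySem.Chars.replace.go [a] [b] fuel l acc = acc.reverse ++ l.map (pvSub a b) := by
  intro l
  induction l with
  | nil => intro acc fuel _; cases fuel <;> simp [PySem.Chars.replace.go]
  | cons c t ih =>
    intro acc fuel hf
    cases fuel with
    | zero => simp at hf
    | succ n =>
      simp only [PySem.Chars.replace.go]
      by_cases hca : c = a
      · subst hca
        simp only [List.isPrefixOf, beq_self_eq_true, Bool.and_self, if_pos]
        have hdrop : List.drop [c].length (c :: t) = t := rfl
        rw [hdrop, ih _ n (by simpa using hf)]
        simp [pvSub]
      · have : List.isPrefixOf [a] (c :: t) = false := by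
          simp [List.isPrefixOf]; exact fun h => absurd h.symm hca
        rw [this]
        simp only [Bool.false_eq_true, if_false]
        rw [ih _ n (by simpa using hf)]
        simp [pvSub, hca]

theorem pv_replace_single (a b : Char) (l : List Char) :
    PySem.Chars.replace l [a] [b] = l.map (pvSub a b) := by
  rw [PySem.Chars.replace]
  simp only [List.isEmpty_cons, Bool.false_eq_true, if_false]
  simpa using pv_go_single a b l [] l.length le_rfl

-- the net effect of A's sequence of global replaces, as a function on chars
def pvPhi : List Char → Char → Char
  | [], x => x
  | i :: cs, x => pvPhi cs (pvSub i (pvFS i) x)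

theorem pvPhi_fixed : ∀ (cs : List Char) (x : Char), x ∉ cs → pvPhi cs x = x := by
  intro cs
  induction cs with
  | nil => intro x _; rfl
  | cons i cs ih =>
    intro x hx
    have hxi : x ≠ i := fun h => hx (h ▸ List.mem_cons_self ..)
    simp only [pvPhi, pvSub, if_neg hxi]
    exact ih x (fun h => hx (List.mem_cons_of_mem _ h))

theorem pvPhi_pair (a b : Char) (hab : a ≠ b) (hfa : pvFS a = b) (hfb : pvFS b = a) :
    ∀ (cs : List Char), (a ∈ cs ∨ b ∈ cs) → pvPhi cs a = pvPhi cs b := by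
  intro cs
  induction cs with
  | nil => intro h; rcases h with h | h <;> simp at h
  | cons i cs ih =>
    intro hmem
    by_cases hia : i = a
    · have e1 : pvSub i (pvFS i) a = b := by simp [pvSub, hia, hfa]
      have e2 : pvSub i (pvFS i) b = b := by simp [pvSub, hia, Ne.symm hab]
      simp only [pvPhi, e1, e2]
    · by_cases hib : i = b
      · have e1 : pvSub i (pvFS i) a = a := by simp [pvSub, hib, hab]
        have e2 : pvSub i (pvFS i) b = a := by simp [pvSub, hib, hfb]
        simp only [pvPhi, e1, e2]
      · have hai : ¬a = i := fun h => hia h.symm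
        have hbi : ¬b = i := fun h => hib h.symm
        have e1 : pvSub i (pvFS i) a = a := by simp [pvSub, hai]
        have e2 : pvSub i (pvFS i) b = b := by simp [pvSub, hbi]
        simp only [pvPhi, e1, e2]
        apply ih
        rcases hmem with h | h
        · rcases List.mem_cons.mp h with h' | h'
          · exact absurd h'.symm hia
          · exact Or.inl h'
        · rcases List.mem_cons.mp h with h' | h'
          · exact absurd h'.symm hib
          · exact Or.inr h'

theorem pvPhi_eq : ∀ (cs : List Char), ¬('d' ∈ cs ∧ 'b' ∈ cs) → ¬('p' ∈ cs ∧ 'q' ∈ cs) →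
    ∀ x ∈ cs, pvPhi cs x = pvFS x := by
  intro cs
  induction cs with
  | nil => intro _ _ x hx; simp at hx
  | cons i cs ih =>
    intro hdb hpq x hx
    have hdb' : ¬('d' ∈ cs ∧ 'b' ∈ cs) := fun h => hdb ⟨List.mem_cons_of_mem _ h.1, List.mem_cons_of_mem _ h.2⟩
    have hpq' : ¬('p' ∈ cs ∧ 'q' ∈ cs) := fun h => hpq ⟨List.mem_cons_of_mem _ h.1, List.mem_cons_of_mem _ h.2⟩
    by_cases hxi : x = i
    · subst hxi
      have e1 : pvSub x (pvFS x) x = pvFS x := by simp [pvSub]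
      simp only [pvPhi, e1]
      by_cases hfx : pvFS x = x
      · rw [hfx]
        by_cases hxcs : x ∈ cs
        · rw [ih hdb' hpq' x hxcs, hfx]
        · exact pvPhi_fixed cs x hxcs
      · have hpart : pvFS x ∉ cs := by
          rcases pvFS_cases x hfx with ⟨h1, h2⟩ | ⟨h1, h2⟩ | ⟨h1, h2⟩ | ⟨h1, h2⟩
          · rw [h2]; intro hc; exact hdb ⟨List.mem_cons.mpr (Or.inl h1.symm), List.mem_cons_of_mem _ hc⟩
          · rw [h2]; intro hc; exact hdb ⟨List.mem_cons_of_mem _ hc, List.mem_cons.mpr (Or.inl h1.symm)⟩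
          · rw [h2]; intro hc; exact hpq ⟨List.mem_cons.mpr (Or.inl h1.symm), List.mem_cons_of_mem _ hc⟩
          · rw [h2]; intro hc; exact hpq ⟨List.mem_cons_of_mem _ hc, List.mem_cons.mpr (Or.inl h1.symm)⟩
        exact pvPhi_fixed cs (pvFS x) hpart
    · have e1 : pvSub i (pvFS i) x = x := by simp [pvSub, hxi]
      simp only [pvPhi, e1]
      rcases List.mem_cons.mp hx with h | h
      · exact absurd h hxi
      · exact ih hdb' hpq' x h

theorem pv_fold_toList (cs : List Char) : ∀ (s : String),
    (cs.foldl (fun s i => PySem.Str.replace s (String.ofList [i]) (String.ofList [pvMirror.getD i i])) s).toList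
      = s.toList.map (pvPhi cs) := by
  induction cs with
  | nil => intro s; simp [pvPhi]
  | cons i cs ih =>
    intro s
    simp only [List.foldl_cons, ih]
    rw [PySem.Str.toList_replace]
    simp only [String.toList_ofList, pvGetD_eq, pv_replace_single, List.map_map]
    rfl

theorem pv_valid_fold : ∀ (cs : List Char) (e : Bool),
    cs.foldl (fun e i => if pvMirror.contains i then e else false) e
      = (e && cs.all (fun i => pvMirror.contains i)) := by
  intro cs
  induction cs with
  | nil => intro e; simp
  | cons i cs ih =>
    intro e
    simp only [List.foldl_cons, List.all_cons, ih]
    cases h : pvMirror.contains i <;> simp [h]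

-- A's value on a valid word, as a list computation
theorem pv_espelho_valid (palavra : String)
    (hv : palavra.toList.all (fun i => pvMirror.contains i) = true) :
    espelho palavra = String.ofList ((palavra.toList.map (pvPhi palavra.toList)).reverse) := by
  unfold espelho
  rw [pv_valid_fold, hv]
  simp only [Bool.true_and, if_true]
  rw [PySem.Str.slice?_none_none_neg_one]
  simp [pv_fold_toList]

theorem pv_alt_valid (palavra : String)
    (hv : palavra.toList.all (fun i => pvMirror.contains i) = true) :
    espelho_alt palavra = String.ofList ((palavra.toList.map pvFS).reverse) := by
  unfold espelho_alt
  have : palavra.toList.any (fun c => !(pvMirror.contains c)) = false := by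
    simp only [List.any_eq_false]
    intro c hc
    simp [List.all_eq_true.mp hv c hc]
  rw [this]
  simp only [Bool.false_eq_true, if_false]
  rw [List.map_reverse]
  simp only [pvGetD_eq]

theorem pv_all_iff (palavra : String) :
    palavra.toList.all (fun i => pvMirror.contains i) = true ↔ ∀ c ∈ palavra.toList, c ∈ pvKeys := by
  simp [List.all_eq_true, pvContains_eq]

theorem pvD_iff (palavra : String) : D_espelho palavra ↔
    ((∀ c ∈ palavra.toList, c ∈ pvKeys) ∧
     (('d' ∈ palavra.toList ∧ 'b' ∈ palavra.toList) ∨ ('p' ∈ palavra.toList ∧ 'q' ∈ palavra.toList))) := by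
  unfold D_espelho pvKeys
  constructor
  · rintro ⟨h1, r, hr, hmem⟩
    refine ⟨by simpa using h1, ?_⟩
    simp only [List.mem_cons, List.not_mem_nil, or_false] at hr
    rcases hr with rfl | rfl
    · exact Or.inl ⟨hmem 'd' (by simp), hmem 'b' (by simp)⟩
    · exact Or.inr ⟨hmem 'p' (by simp), hmem 'q' (by simp)⟩
  · rintro ⟨h1, h2⟩
    refine ⟨by simpa using h1, ?_⟩
    rcases h2 with ⟨ha, hb⟩ | ⟨ha, hb⟩
    · refine ⟨"db", by simp, ?_⟩
      have e : "db".toList = ['d', 'b'] := by simp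
      simp only [e]; intro c hc
      rcases List.mem_cons.mp hc with rfl | hc'
      · exact ha
      · rcases List.mem_cons.mp hc' with rfl | hc''
        · exact hb
        · simp at hc''
    · refine ⟨"pq", by simp, ?_⟩
      have e : "pq".toList = ['p', 'q'] := by simp
      simp only [e]; intro c hc
      rcases List.mem_cons.mp hc with rfl | hc'
      · exact ha
      · rcases List.mem_cons.mp hc' with rfl | hc''
        · exact hb
        · simp at hc''

-- ===== VERDICT (by name: the statement is the Claim_ definition above) =====
theorem espelho_spec : Claim_unchanged_espelho := by
  intro palavra _ hD
  by_cases hv : palavra.toList.all (fun i => pvMirror.contains i) = true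
  · rw [pv_espelho_valid palavra hv, pv_alt_valid palavra hv]
    have hkeys : ∀ c ∈ palavra.toList, c ∈ pvKeys := (pv_all_iff palavra).mp hv
    have hnm : ¬(('d' ∈ palavra.toList ∧ 'b' ∈ palavra.toList) ∨ ('p' ∈ palavra.toList ∧ 'q' ∈ palavra.toList)) :=
      fun h => hD ((pvD_iff palavra).mpr ⟨hkeys, h⟩)
    have hnm1 : ¬('d' ∈ palavra.toList ∧ 'b' ∈ palavra.toList) := fun h => hnm (Or.inl h)
    have hnm2 : ¬('p' ∈ palavra.toList ∧ 'q' ∈ palavra.toList) := fun h => hnm (Or.inr h)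
    congr 1
    congr 1
    exact List.map_congr_left (pvPhi_eq palavra.toList hnm1 hnm2)
  · unfold espelho espelho_alt
    rw [pv_valid_fold]
    simp only [Bool.true_and]
    rw [eq_false_of_ne_true hv]
    have : palavra.toList.any (fun c => !(pvMirror.contains c)) = true := by
      rw [List.all_eq_true] at hv
      rcases not_forall.mp hv with ⟨c, hc⟩
      rcases Classical.not_imp.mp hc with ⟨hcm, hcc⟩
      rw [List.any_eq_true]
      exact ⟨c, hcm, by simp [Bool.not_eq_true] at hcc ⊢; exact hcc⟩
    rw [this]
    rfl

set_option maxRecDepth 40000 in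
theorem espelho_changed : Claim_changed_espelho := by
  unfold Claim_changed_espelho
  refine ⟨by decide, (pvD_iff _).mpr ⟨by intro c hc; simp [pvDiffWitness_espelho] at hc; rcases hc with rfl | rfl <;> simp [pvKeys], Or.inl ⟨by simp [pvDiffWitness_espelho], by simp [pvDiffWitness_espelho]⟩⟩, rfl, rfl, by simp [pvDiffWitnessOut_espelho]⟩

theorem espelho_tight : Claim_exact_espelho := by
  intro palavra _ hD heq
  have hD' := (pvD_iff palavra).mp hD
  have hv : palavra.toList.all (fun i => pvMirror.contains i) = true := (pv_all_iff palavra).mpr hD'.1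
  rw [pv_espelho_valid palavra hv, pv_alt_valid palavra hv] at heq
  have hlists : palavra.toList.map (pvPhi palavra.toList) = palavra.toList.map pvFS := by
    have := congrArg String.toList heq
    simpa using this
  have hpt : ∀ x ∈ palavra.toList, pvPhi palavra.toList x = pvFS x :=
    fun x hxm => by
      have := List.map_inj_left.mp hlists x hxm
      exact this
  rcases hD'.2 with ⟨hd, hb⟩ | ⟨hp, hq⟩
  · have h1 := hpt 'd' hd
    have h2 := hpt 'b' hb
    have h3 := pvPhi_pair 'd' 'b' (by decide) (by decide) (by decide) palavra.toList (Or.inl hd)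
    rw [h1, h2] at h3
    exact absurd h3 (by decide)
  · have h1 := hpt 'p' hp
    have h2 := hpt 'q' hq
    have h3 := pvPhi_pair 'p' 'q' (by decide) (by decide) (by decide) palavra.toList (Or.inl hp)
    rw [h1, h2] at h3
    exact absurd h3 (by decide)
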